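-- pv_equiv track=rewrite | github.com/smirik/mass-resonances | resonances/shortcuts.py | planets_gen
-- ===== SOURCE A (Python) =====
-- from typing import Tuple
-- from typing import Iterable
-- from itertools import combinations
-- from functools import reduce
-- from operator import add
--
-- PLANETS = ['EARTHMOO', 'JUPITER', 'MARS', 'NEPTUNE',
--            'SATURN', 'URANUS', 'VENUS']
--
-- ANY_PLANET = 'all'
--
-- def planets_gen(planets: Tuple[str]) -> Iterable[Tuple[str]]:
--     """
--     Method generates combinations of planets. If pointed word "all" instead
--     planet name then method will make combination without repeatitions.
--     """
--     if any([x == ANY_PLANET for x in planets]):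
--         variations = [None for x in planets]
--
--         for i, planet_expr in enumerate(planets):
--             if planet_expr != ANY_PLANET:
--                 variations[i] = [planet_expr]
--
--         filtered_variations = [x for x in variations if x is not None]
--         explicit_defined_planets = reduce(add, filtered_variations) if filtered_variations else None
--         if explicit_defined_planets:
--             possible_planets = [x for x in PLANETS if x not in explicit_defined_planets]
--         else:
--             possible_planets = PLANETS
--
--         variation_vector_count = sum([1 for x in variations if x is None])
--         planet_combinations = [x for x in combinations(possible_planets, variation_vector_count)]
--
--         j = 0
--         for i, item in enumerate(variations):
--             if item is None:
--                 variations[i] = [x[j] for x in planet_combinations]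
--                 j += 1
--             else:
--                 variations[i] = item * len(planet_combinations)
--
--         for i in range(len(variations[0])):
--             yield tuple(variations[x][i] for x in range(len(variations)))
--     else:
--         yield planets
-- ===== SOURCE B (Python) =====
-- from itertools import combinations
--
-- PLANETS = ['EARTHMOO', 'JUPITER', 'MARS', 'NEPTUNE',
--            'SATURN', 'URANUS', 'VENUS']
--
-- ANY_PLANET = 'all'
--
--
-- def planets_gen(planets):
--     if ANY_PLANET in planets:
--         explicit = [p for p in planets if p != ANY_PLANET]
--         possible = [p for p in PLANETS if p not in explicit] if explicit else PLANETS
--         k = planets.count(ANY_PLANET)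
--         for combo in combinations(possible, k):
--             it = iter(combo)
--             yield tuple(next(it) if p == ANY_PLANET else p for p in planets)
--     else:
--         yield planets
-- ===== Notes on version B (the rewrite author's own statement) =====
-- stated objective: simpler
-- what changed: Replaces the column-wise 'variations' matrix construction plus index-based transpose with a direct row-wise loop over combinations(possible, k), filling each wildcard slot from an iterator over the combination.
import Mathlib
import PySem

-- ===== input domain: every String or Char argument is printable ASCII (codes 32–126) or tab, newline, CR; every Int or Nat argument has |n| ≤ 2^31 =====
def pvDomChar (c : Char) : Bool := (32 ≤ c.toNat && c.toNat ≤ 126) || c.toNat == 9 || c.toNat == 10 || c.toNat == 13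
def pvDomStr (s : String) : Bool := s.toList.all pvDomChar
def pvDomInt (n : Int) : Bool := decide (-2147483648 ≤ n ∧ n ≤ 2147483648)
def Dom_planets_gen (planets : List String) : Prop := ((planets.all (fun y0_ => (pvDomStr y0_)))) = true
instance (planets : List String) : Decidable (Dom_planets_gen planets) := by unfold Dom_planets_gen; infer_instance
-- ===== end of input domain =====

-- B is a simpler row-wise re-implementation of the same generation (same cost); equivalence of return values is proved below.

def pvPLANETS : List String :=
  ["EARTHMOO", "JUPITER", "MARS", "NEPTUNE", "SATURN", "URANUS", "VENUS"]

-- itertools.combinations in Python's order (both Pythons call it)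
def pvCombos : List String → Nat → List (List String)
  | _, 0 => [[]]
  | [], _ + 1 => []
  | x :: xs, k + 1 => (pvCombos xs k).map (fun c => x :: c) ++ pvCombos xs (k + 1)

-- ===== PORT A =====
-- second pass over 'variations' with the running index j (item * n ported as flatten of replicate)
def pvFillA : List (Option (List String)) → Nat → List (List String) → List (List String)
  | [], _, _ => []
  | none :: rest, j, pcs => (pcs.map (fun x => x.getD j "")) :: pvFillA rest (j + 1) pcs
  | some item :: rest, j, pcs => (List.replicate pcs.length item).flatten :: pvFillA rest j pcs

def planets_gen (planets : List String) : List (List String) :=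
  if planets.any (fun x => x == "all") then
    let variations : List (Option (List String)) :=
      planets.map (fun p => if p ≠ "all" then some [p] else none)
    let filtered := variations.filterMap id
    let explicit : Option (List String) := if filtered.isEmpty then none else some filtered.flatten
    let possible :=
      match explicit with
      | some e => if e.isEmpty then pvPLANETS else pvPLANETS.filter (fun x => ¬ e.contains x)
      | none => pvPLANETS
    let k := (variations.filter (fun v => v.isNone)).length
    let pcs := pvCombos possible k
    let varFilled := pvFillA variations 0 pcs
    (List.range (varFilled.headD []).length).map (fun i => varFilled.map (fun col => col.getD i ""))
  else [planets]

-- ===== PORT B =====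
-- 'next(it) if p == "all" else p' over the row: consume the combination left to right
def pvFillB : List String → List String → List String
  | [], _ => []
  | p :: ps, combo =>
    if p == "all" then combo.headD "" :: pvFillB ps combo.tail else p :: pvFillB ps combo

def planets_gen_alt (planets : List String) : List (List String) :=
  if planets.contains "all" then
    let explicit := planets.filter (fun p => p ≠ "all")
    let possible :=
      if explicit.isEmpty then pvPLANETS else pvPLANETS.filter (fun x => ¬ explicit.contains x)
    let k := planets.count "all"
    (pvCombos possible k).map (fun c => pvFillB planets c)
  else [planets]

-- ===== PRECONDITION & SPEC =====
def Spec_planets_gen (planets : List String) (out : List (List String)) : Prop := out = planets_gen_alt planets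
instance (planets : List String) (out : List (List String)) : Decidable (Spec_planets_gen planets out) := by unfold Spec_planets_gen; infer_instance

-- ===== CLAIM (what is proved, stated in full; the proofs are below) =====
def Claim_equal_planets_gen : Prop := ∀ (planets : List String), Dom_planets_gen planets → Spec_planets_gen planets (planets_gen planets)

-- ===== LEMMAS AND PROOFS =====

theorem pv_headD_drop (c : List String) (j : Nat) : (c.drop j).headD "" = c.getD j "" := by
  induction c generalizing j with
  | nil => simp
  | cons x xs ih => cases j with
    | zero => simp
    | succ j => simp [ih]

-- row i of A's filled matrix is B's fill of the i-th combination (suffix form, counter j)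
theorem pv_row_eq (ps : List String) (pcs : List (List String)) (i j : Nat)
    (hi : i < pcs.length) :
    (pvFillA (ps.map (fun p => if p ≠ "all" then some [p] else none)) j pcs).map
        (fun col => col.getD i "") =
      pvFillB ps ((pcs.getD i []).drop j) := by
  induction ps generalizing j with
  | nil => simp [pvFillA, pvFillB]
  | cons p ps ih =>
    by_cases hp : p = "all"
    · subst hp
      have h1 : (if ("all" : String) ≠ "all" then some ["all"] else none) = (none : Option (List String)) := by
        simp
      rw [List.map_cons, h1, pvFillA, List.map_cons, pvFillB]
      rw [if_pos (by simp : (("all" : String) == "all") = true)]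
      rw [List.cons.injEq]
      refine ⟨?_, ?_⟩
      · rw [pv_headD_drop, List.getD_eq_getElem?_getD, List.getElem?_map,
          List.getElem?_eq_getElem hi]
        simp [List.getD, List.getElem?_eq_getElem hi]
      · rw [List.tail_drop]
        exact ih (j + 1)
    · have h1 : (if p ≠ "all" then some [p] else none) = some [p] := by
        simp [hp]
      rw [List.map_cons, h1, pvFillA, List.map_cons, pvFillB]
      rw [if_neg (show ¬ ((p == "all") = true) by simpa using hp)]
      rw [List.cons.injEq]
      refine ⟨?_, ih j⟩
      have : (List.replicate pcs.length [p]).flatten = List.replicate pcs.length p := by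
        induction pcs.length with
        | zero => simp
        | succ n ihn => simp [List.replicate_succ, ihn]
      rw [this, List.getD_eq_getElem?_getD, List.getElem?_replicate, if_pos hi]
      rfl

theorem pv_fillA_head_len (p : String) (ps : List String) (j : Nat) (pcs : List (List String)) :
    ((pvFillA ((p :: ps).map (fun q => if q ≠ "all" then some [q] else none)) j pcs).headD []).length
      = pcs.length := by
  by_cases hp : p = "all"
  · simp [hp, pvFillA]
  · simp [hp, pvFillA]

theorem pv_filtered_eq (ps : List String) :
    (ps.map (fun p => if p ≠ "all" then some [p] else none)).filterMap id
      = (ps.filter (fun p => p ≠ "all")).map (fun p => [p]) := by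
  induction ps with
  | nil => rfl
  | cons p ps ih =>
    by_cases hp : p = "all" <;>
      simpa [hp, List.filterMap_cons, List.filter_cons] using ih

theorem pv_flatten_singletons (l : List String) :
    (l.map (fun p => [p])).flatten = l := by
  induction l with
  | nil => rfl
  | cons x xs ih => simp [ih]

theorem pv_count_eq (ps : List String) :
    ((ps.map (fun p => if p ≠ "all" then some [p] else none)).filter (fun v => v.isNone)).length
      = ps.count "all" := by
  induction ps with
  | nil => rfl
  | cons p ps ih =>
    by_cases hp : p = "all" <;>
      simpa [hp, List.filter_cons, List.count_cons] using ih

-- rows of A's transpose, enumerated over range (pcs.length), are exactly B's map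
theorem pv_range_map (pcs : List (List String)) (f : List String → List String) :
    (List.range pcs.length).map (fun i => f (pcs.getD i [])) = pcs.map f := by
  apply List.ext_getElem
  · simp
  · intro i h1 h2
    have hi : i < pcs.length := by simpa using h2
    simp [List.getD_eq_getElem?_getD, List.getElem?_eq_getElem hi]

-- ===== VERDICT (by name: the statement is the Claim_ definition above) =====
theorem pv_main (planets : List String) (pcs : List (List String)) (hne : planets ≠ []) :
    (List.range
        ((pvFillA (planets.map (fun p => if p ≠ "all" then some [p] else none)) 0 pcs).headD []).length).map
      (fun i =>
        (pvFillA (planets.map (fun p => if p ≠ "all" then some [p] else none)) 0 pcs).map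
          (fun col => col.getD i ""))
      = pcs.map (fun c => pvFillB planets c) := by
  obtain ⟨p, ps, rfl⟩ := List.exists_cons_of_ne_nil hne
  rw [pv_fillA_head_len p ps 0 pcs]
  calc (List.range pcs.length).map
        (fun i => (pvFillA ((p :: ps).map (fun q => if q ≠ "all" then some [q] else none)) 0 pcs).map
          (fun col => col.getD i ""))
      = (List.range pcs.length).map (fun i => pvFillB (p :: ps) (pcs.getD i [])) := by
        apply List.map_congr_left
        intro i hi
        have hi' : i < pcs.length := by simpa using hi
        simpa using pv_row_eq (p :: ps) pcs i 0 hi'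
    _ = pcs.map (fun c => pvFillB (p :: ps) c) := pv_range_map pcs _

theorem pv_cond_eq (planets : List String) :
    (planets.any (fun x => x == "all")) = planets.contains "all" := by
  rw [Bool.eq_iff_iff]
  simp only [List.any_eq_true, beq_iff_eq, List.contains_eq_mem, decide_eq_true_eq]
  exact ⟨fun ⟨x, hx, h⟩ => h ▸ hx, fun h => ⟨_, h, rfl⟩⟩

theorem planets_gen_spec : Claim_equal_planets_gen := by
  intro planets _
  show planets_gen planets = planets_gen_alt planets
  unfold planets_gen planets_gen_alt
  rw [pv_cond_eq]
  by_cases hc : planets.contains "all" = true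
  · rw [if_pos hc, if_pos hc]
    have hne : planets ≠ [] := by
      intro h; subst h; exact absurd hc (by decide)
    dsimp only
    rw [pv_filtered_eq, pv_flatten_singletons, pv_count_eq]
    cases hE : planets.filter (fun p => p ≠ "all") with
    | nil => simpa using pv_main planets _ hne
    | cons a l => simpa using pv_main planets _ hne
  · rw [if_neg hc, if_neg hc]
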